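-- pv_equiv track=rewrite | github.com/jiny7157502/algorithm_study | 7주차 테스트/q2.py | solution
-- ===== SOURCE A (Python) =====
-- import math
--
-- def solution(citations):
--     citations.sort(reverse = True)
--     answer = 0
--     for i in range(len(citations)):
--         if i+1 >= math.ceil(len(citations)/2):
--             answer = citations[i]
--             break
--     return answer
-- ===== SOURCE B (Python) =====
-- def solution(citations):
--     # Quickselect for the k-th largest (k = ceil(n/2)); no sorting.
--     # Unlike A, does not mutate the input list; return value is identical.
--     n = len(citations)
--     if n == 0:
--         return 0
--     k = (n + 1) // 2
--     xs = citations
--     while True: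
--         pivot = xs[len(xs) // 2]
--         greater = [x for x in xs if x > pivot]
--         if k <= len(greater):
--             xs = greater
--             continue
--         eq = len([x for x in xs if x == pivot])
--         if k <= len(greater) + eq:
--             return pivot
--         k -= len(greater) + eq
--         xs = [x for x in xs if x < pivot]
-- ===== Notes on version B (the rewrite author's own statement) =====
-- stated objective: faster
-- what changed: Replaced sort-then-scan-for-first-index (full descending sort plus a linear search for the break index) by a three-way-partition quickselect that finds the ceil(n/2)-th largest element directly without sorting.
import Mathlib
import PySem

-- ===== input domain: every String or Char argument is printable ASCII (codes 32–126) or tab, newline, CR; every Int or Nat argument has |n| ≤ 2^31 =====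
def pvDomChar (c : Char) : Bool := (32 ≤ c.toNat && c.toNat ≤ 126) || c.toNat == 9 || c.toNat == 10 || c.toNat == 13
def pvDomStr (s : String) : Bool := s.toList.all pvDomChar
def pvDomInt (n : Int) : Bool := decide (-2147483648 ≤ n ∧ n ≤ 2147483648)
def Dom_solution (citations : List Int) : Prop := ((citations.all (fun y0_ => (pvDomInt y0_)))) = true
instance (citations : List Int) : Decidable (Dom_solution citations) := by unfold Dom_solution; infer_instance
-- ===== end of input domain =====

-- B replaces A's full descending sort + linear scan for the break index by a quickselect
-- (three-way partition) for the ceil(n/2)-th largest; objective: faster.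
-- A sorts its argument in place (observable mutation); B does not — the equivalence proved
-- here is about the return value only.

-- ===== PORT A =====
-- 'for i in range(n): if i+1 >= c: answer = citations[i]; break' — break becomes return,
-- the carried 'answer' is returned when the range is exhausted. citations[i] is in range
-- for every i produced by the loop, so pyGetD with default 0 is exact here.
def solLoopA (s : List Int) (c : Int) : List Int → Int → Int
  | [], answer => answer
  | i :: rest, answer =>
    if i + 1 ≥ c then PySem.List.pyGetD s i 0
    else solLoopA s c rest answer

def solution (citations : List Int) : Int :=
  let s := PySem.List.sorted citations (fun x => x) true
  let n : Int := s.length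
  -- math.ceil(n/2) = (n+1)//2, exact for every integer n
  let c := PySem.Int.floordiv (n + 1) 2
  solLoopA s c (PySem.List.pyRange 0 n 1) 0

-- ===== PORT B =====
-- pivot = xs[len(xs)//2]: Python indexing, always in range on a nonempty list (used by the
-- termination argument below, so stated before qsel)
theorem pyGetD_mid_mem (x : Int) (rest : List Int) :
    PySem.List.pyGetD (x :: rest) (PySem.Int.floordiv ((x :: rest).length : Int) 2) 0
      ∈ x :: rest := by
  have hm : PySem.Int.floordiv ((x :: rest).length : Int) 2
      = (((x :: rest).length / 2 : Nat) : Int) := by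
    exact_mod_cast PySem.Int.floordiv_natCast (x :: rest).length 2
  rw [hm, PySem.List.pyGetD_eq_getElem _ _ (by positivity)
        (by exact_mod_cast Nat.div_lt_self (Nat.succ_pos _) one_lt_two)]
  exact List.getElem_mem _

-- the 'while True' loop of Source B as tail recursion; k stays an Int as in Python
def qsel : List Int → Int → Int
  | [], _ => 0  -- unreachable: the loop is only entered with 1 ≤ k ≤ len(xs)
  | x :: rest, k =>
    let q := PySem.List.pyGetD (x :: rest) (PySem.Int.floordiv ((x :: rest).length : Int) 2) 0
    let g := (x :: rest).filter (fun y => decide (q < y))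
    if k ≤ (g.length : Int) then qsel g k
    else
      let e := ((x :: rest).filter (fun y => decide (y = q))).length
      if k ≤ (g.length : Int) + e then q
      else qsel ((x :: rest).filter (fun y => decide (y < q))) (k - ((g.length : Int) + e))
termination_by xs => xs.length
decreasing_by
  · exact List.length_filter_lt_length_iff_exists.mpr ⟨_, pyGetD_mid_mem x rest, by simp⟩
  · exact List.length_filter_lt_length_iff_exists.mpr ⟨_, pyGetD_mid_mem x rest, by simp⟩

def solution_alt (citations : List Int) : Int :=
  let n : Int := citations.length
  if n = 0 then 0
  else qsel citations (PySem.Int.floordiv (n + 1) 2)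

-- ===== PRECONDITION & SPEC =====
def Spec_solution (citations : List Int) (out : Int) : Prop := out = solution_alt citations
instance (citations : List Int) (out : Int) : Decidable (Spec_solution citations out) := by unfold Spec_solution; infer_instance

-- ===== CLAIM (what is proved, stated in full; the proofs are below) =====
def Claim_equal_solution : Prop := ∀ (citations : List Int), Dom_solution citations → Spec_solution citations (solution citations)

-- ===== LEMMAS AND PROOFS =====

-- A's loop over range(0,n) returns s[c-1] whenever 1 ≤ c ≤ n (the first i with i+1 ≥ c is c-1)
theorem solLoopA_finds (s : List Int) (c n i ans : Int) (hi : i ≤ c - 1) (hc : c - 1 < n) :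
    solLoopA s c (PySem.List.pyRange i n 1) ans = PySem.List.pyGetD s (c - 1) 0 := by
  have hin : i < n := lt_of_le_of_lt hi hc
  rw [PySem.List.pyRange_one_cons hin]
  by_cases h : i + 1 ≥ c
  · have : i = c - 1 := le_antisymm hi (by omega)
    simp [solLoopA, this]
  · rw [show solLoopA s c (i :: PySem.List.pyRange (i+1) n 1) ans
        = solLoopA s c (PySem.List.pyRange (i+1) n 1) ans by simp [solLoopA, h]]
    exact solLoopA_finds s c n (i+1) ans (by omega) hc
termination_by (c - 1 - i).toNat
decreasing_by omega

-- the descending sort of Int (identity key) is the unique ≥-ordered permutation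
theorem sortedDesc_eq (xs ys : List Int) (hp : ys.Perm xs)
    (hs : ys.Pairwise (fun a b => b ≤ a)) :
    PySem.List.sorted xs (fun x => x) true = ys := by
  refine List.Perm.eq_of_pairwise (le := fun a b => b ≤ a)
    (fun a b _ _ h1 h2 => le_antisymm h2 h1) ?_ hs
    (((PySem.List.sorted_perm xs (fun x => x) true)).trans hp.symm)
  simpa using PySem.List.sorted_pairwise_rev xs (fun x => x)

-- three-way partition of a list around a pivot is a permutation of the list
theorem partition3_perm (p : Int) : ∀ (xs : List Int),
    (xs.filter (fun x => decide (p < x)) ++ xs.filter (fun x => decide (x = p))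
      ++ xs.filter (fun x => decide (x < p))).Perm xs := by
  intro xs
  induction xs with
  | nil => simp
  | cons y ys ih =>
    by_cases h1 : p < y
    · have h2 : ¬ y = p := by omega
      have h3 : ¬ y < p := by omega
      simpa [List.filter_cons, h1, h2, h3] using ih.cons y
    · by_cases h2 : y = p
      · have h3 : ¬ y < p := by omega
        have step1 : (ys.filter (fun x => decide (p < x)) ++ y :: ys.filter (fun x => decide (x = p))
            ++ ys.filter (fun x => decide (x < p))).Perm
            (y :: (ys.filter (fun x => decide (p < x)) ++ ys.filter (fun x => decide (x = p))
              ++ ys.filter (fun x => decide (x < p)))) := by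
          simpa [List.append_assoc] using
            (List.perm_middle (a := y) (l₁ := ys.filter (fun x => decide (p < x)))
              (l₂ := ys.filter (fun x => decide (x = p)) ++ ys.filter (fun x => decide (x < p))))
        simpa [List.filter_cons, h1, h2, h3] using step1.trans (ih.cons y)
      · have h3 : y < p := by omega
        have step1 : ((ys.filter (fun x => decide (p < x)) ++ ys.filter (fun x => decide (x = p)))
            ++ y :: ys.filter (fun x => decide (x < p))).Perm
            (y :: ((ys.filter (fun x => decide (p < x)) ++ ys.filter (fun x => decide (x = p)))
              ++ ys.filter (fun x => decide (x < p)))) :=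
          List.perm_middle (a := y)
            (l₁ := ys.filter (fun x => decide (p < x)) ++ ys.filter (fun x => decide (x = p)))
            (l₂ := ys.filter (fun x => decide (x < p)))
        have h1' : ¬ p < y := h1
        simpa [List.filter_cons, h1', h2, h3] using step1.trans (ih.cons y)

-- decomposition: sortedDesc xs = sortedDesc (>p part) ++ (=p part) ++ sortedDesc (<p part)
theorem sortedDesc_decomp (p : Int) (xs : List Int) :
    PySem.List.sorted xs (fun x => x) true
      = PySem.List.sorted (xs.filter (fun x => decide (p < x))) (fun x => x) true
        ++ xs.filter (fun x => decide (x = p))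
        ++ PySem.List.sorted (xs.filter (fun x => decide (x < p))) (fun x => x) true := by
  apply sortedDesc_eq
  · exact (List.Perm.append
      (List.Perm.append (PySem.List.sorted_perm _ _ _) (List.Perm.refl _))
      (PySem.List.sorted_perm _ _ _)).trans (partition3_perm p xs)
  · have hG : ∀ x ∈ PySem.List.sorted (xs.filter (fun x => decide (p < x))) (fun x => x) true,
        p < x := by
      intro x hx
      have := (PySem.List.mem_sorted _ _ _ x).mp hx
      simpa using (List.of_mem_filter this)
    have hE : ∀ x ∈ xs.filter (fun x => decide (x = p)), x = p := by
      intro x hx; simpa using (List.of_mem_filter hx)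
    have hL : ∀ x ∈ PySem.List.sorted (xs.filter (fun x => decide (x < p))) (fun x => x) true,
        x < p := by
      intro x hx
      have := (PySem.List.mem_sorted _ _ _ x).mp hx
      simpa using (List.of_mem_filter this)
    rw [List.pairwise_append, List.pairwise_append]
    refine ⟨⟨by simpa using PySem.List.sorted_pairwise_rev _ (fun x : Int => x),
      List.pairwise_of_forall_mem_list (fun a ha b hb => le_of_eq (by rw [hE a ha, hE b hb])), ?_⟩,
      by simpa using PySem.List.sorted_pairwise_rev _ (fun x : Int => x), ?_⟩
    · intro a ha b hb
      exact le_of_lt ((hE b hb) ▸ hG a ha)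
    · intro a ha b hb
      rcases List.mem_append.mp ha with h | h
      · exact le_of_lt (lt_trans (hL b hb) (hG a h))
      · exact le_of_lt ((hE a h) ▸ hL b hb)

-- indexing the three-block decomposition (Python indexing via pyGetD)
theorem pyGetD_append3_left (A B C : List Int) (j : Int) (h0 : 0 ≤ j) (h : j < (A.length : Int)) :
    PySem.List.pyGetD (A ++ B ++ C) j 0 = PySem.List.pyGetD A j 0 := by
  rw [PySem.List.pyGetD_eq_getElem _ _ h0 (by simp only [List.length_append]; push_cast; omega),
      PySem.List.pyGetD_eq_getElem _ _ h0 h,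
      List.getElem_append_left (by simp only [List.length_append]; omega),
      List.getElem_append_left (by omega)]

theorem pyGetD_append3_mid (A B C : List Int) (j : Int) (h1 : (A.length : Int) ≤ j)
    (h2 : j < (A.length : Int) + B.length) :
    PySem.List.pyGetD (A ++ B ++ C) j 0 = PySem.List.pyGetD B (j - A.length) 0 := by
  have h0 : 0 ≤ j := le_trans (by positivity) h1
  rw [PySem.List.pyGetD_eq_getElem _ _ h0 (by simp only [List.length_append]; push_cast; omega),
      PySem.List.pyGetD_eq_getElem _ _ (by omega) (by omega),
      List.getElem_append_left (by simp only [List.length_append]; omega),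
      List.getElem_append_right (by omega)]
  congr 1
  omega

theorem pyGetD_append3_right (A B C : List Int) (j : Int)
    (h1 : (A.length : Int) + B.length ≤ j)
    (h2 : j < (A.length : Int) + B.length + C.length) :
    PySem.List.pyGetD (A ++ B ++ C) j 0 = PySem.List.pyGetD C (j - A.length - B.length) 0 := by
  have h0 : 0 ≤ j := le_trans (by positivity) h1
  rw [PySem.List.pyGetD_eq_getElem _ _ h0 (by simp only [List.length_append]; push_cast; omega),
      PySem.List.pyGetD_eq_getElem _ _ (by omega) (by omega),
      List.getElem_append_right (by simp only [List.length_append]; omega)]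
  congr 1
  simp only [List.length_append]
  omega

-- a block of equal elements reads back the pivot
theorem pyGetD_const (B : List Int) (p : Int) (hB : ∀ x ∈ B, x = p) (j : Int)
    (h0 : 0 ≤ j) (h : j < (B.length : Int)) : PySem.List.pyGetD B j 0 = p := by
  rw [PySem.List.pyGetD_eq_getElem _ _ h0 h]
  exact hB _ (List.getElem_mem (by omega))

-- quickselect returns the k-th entry (1-based) of the descending sort
theorem qsel_spec : ∀ (n : Nat), ∀ (xs : List Int), xs.length = n → ∀ (k : Int),
    1 ≤ k → k ≤ (xs.length : Int) →
    qsel xs k = PySem.List.pyGetD (PySem.List.sorted xs (fun x => x) true) (k - 1) 0 := by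
  intro n
  induction n using Nat.strong_induction_on with
  | _ n ih =>
    intro xs hn k hk1 hk2
    match xs, hn with
    | [], hn => simp at hk2; omega
    | x :: rest, hn =>
      set q := PySem.List.pyGetD (x :: rest)
        (PySem.Int.floordiv ((x :: rest).length : Int) 2) 0 with hqdef
      have hq : q ∈ x :: rest := pyGetD_mid_mem x rest
      have hGlt : ((x :: rest).filter (fun y => decide (q < y))).length < (x :: rest).length :=
        List.length_filter_lt_length_iff_exists.mpr ⟨q, hq, by simp⟩
      have hLlt : ((x :: rest).filter (fun y => decide (y < q))).length < (x :: rest).length :=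
        List.length_filter_lt_length_iff_exists.mpr ⟨q, hq, by simp⟩
      have hE1 : 1 ≤ ((x :: rest).filter (fun y => decide (y = q))).length :=
        List.length_pos_of_mem (List.mem_filter.mpr ⟨hq, by simp⟩)
      have hlen : (x :: rest).length
          = ((x :: rest).filter (fun y => decide (q < y))).length
            + ((x :: rest).filter (fun y => decide (y = q))).length
            + ((x :: rest).filter (fun y => decide (y < q))).length := by
        have := (partition3_perm q (x :: rest)).length_eq
        simp only [List.length_append] at this
        omega
      have hGlen : (PySem.List.sorted ((x :: rest).filter (fun y => decide (q < y)))
          (fun x => x) true).length = ((x :: rest).filter (fun y => decide (q < y))).length :=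
        PySem.List.length_sorted _ _ _
      have hLlen : (PySem.List.sorted ((x :: rest).filter (fun y => decide (y < q)))
          (fun x => x) true).length = ((x :: rest).filter (fun y => decide (y < q))).length :=
        PySem.List.length_sorted _ _ _
      have hdec := sortedDesc_decomp q (x :: rest)
      rw [qsel]
      simp only [← hqdef]
      split_ifs with h1 h2
      · -- k ≤ |G| : recurse on the greater part
        rw [ih _ (hn ▸ hGlt) _ rfl k hk1 h1, hdec,
            pyGetD_append3_left _ _ _ _ (by omega) (by rw [hGlen]; omega)]
      · -- |G| < k ≤ |G| + |E| : the pivot block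
        rw [hdec,
            pyGetD_append3_mid _ _ _ _ (by rw [hGlen]; omega)
              (by rw [hGlen]; omega)]
        have hall : ∀ y ∈ (x :: rest).filter (fun y => decide (y = q)), y = q := by
          intro y hy
          simpa using List.of_mem_filter hy
        exact (pyGetD_const _ q hall _ (by rw [hGlen]; omega)
          (by omega)).symm
      · -- recurse on the lesser part
        have hk2' : k ≤ ((x :: rest).length : Int) := hk2
        rw [ih _ (hn ▸ hLlt) _ rfl _ (by omega)
              (by omega), hdec,
            pyGetD_append3_right _ _ _ _
              (by rw [hGlen]; omega)
              (by rw [hGlen, hLlen]; omega)]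
        congr 1
        rw [hGlen]
        ring

-- ===== VERDICT (by name: the statement is the Claim_ definition above) =====
theorem solution_spec : Claim_equal_solution := by
  intro citations _
  unfold Spec_solution
  simp only [solution, solution_alt]
  by_cases h : citations = []
  · subst h; simp [solLoopA, PySem.List.sorted, PySem.List.pyRange]
  · have hN : 0 < citations.length := List.length_pos_iff.mpr h
    have hslen := PySem.List.length_sorted citations (fun x : Int => x) true
    have hc : PySem.Int.floordiv ((citations.length : Int) + 1) 2
        = (((citations.length + 1) / 2 : Nat) : Int) := by
      exact_mod_cast PySem.Int.floordiv_natCast (citations.length + 1) 2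
    have hne : ¬ ((citations.length : Int) = 0) := by
      simp only [Int.natCast_eq_zero]; omega
    have hk1 : (1 : Int) ≤ (((citations.length + 1) / 2 : Nat) : Int) := by
      have : 1 ≤ (citations.length + 1) / 2 := by omega
      exact_mod_cast this
    have hk2 : (((citations.length + 1) / 2 : Nat) : Int) ≤ (citations.length : Int) := by
      have : (citations.length + 1) / 2 ≤ citations.length := by omega
      exact_mod_cast this
    rw [hslen, hc, if_neg hne,
        solLoopA_finds _ _ _ 0 0 (by omega) (by omega),
        qsel_spec citations.length citations rfl _ hk1 hk2]
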